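-- pv_equiv track=rewrite | github.com/jr-marins/estudo-python | exe_cal_imp_renda_dict.py | encontrar_maior_salario
-- ===== SOURCE A (Python) =====
-- def encontrar_maior_salario(cargo_salario):
--     maior_salario = 0  # Variável para armazenar o maior salário
--     cargo_maior_salario = ""  # Variável para armazenar o cargo com maior salário
--
--     # Percorrendo o dicionário
--     for cargo, salario in cargo_salario.items():
--         if salario > maior_salario:  # Se o salário atual for maior que o maior salário
--             maior_salario = salario  # Atualiza o maior salário
--             cargo_maior_salario = cargo  # Atualiza o cargo correspondente
--
--     return cargo_maior_salario, maior_salario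
-- ===== SOURCE B (Python) =====
-- def encontrar_maior_salario(cargo_salario):
--     positivos = [(cargo, salario) for cargo, salario in cargo_salario.items() if salario > 0]
--     if not positivos:
--         return "", 0
--     return max(positivos, key=lambda par: par[1])
-- ===== Notes on version B (the rewrite author's own statement) =====
-- stated objective: alternative
-- what changed: A's fused running-maximum loop with a (best_salary, best_job) accumulator is replaced by a filter of the strictly positive pairs followed by a key-based max over that filtered list (first maximal element), falling back to the empty defaults when nothing is positive.
import Mathlib
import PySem

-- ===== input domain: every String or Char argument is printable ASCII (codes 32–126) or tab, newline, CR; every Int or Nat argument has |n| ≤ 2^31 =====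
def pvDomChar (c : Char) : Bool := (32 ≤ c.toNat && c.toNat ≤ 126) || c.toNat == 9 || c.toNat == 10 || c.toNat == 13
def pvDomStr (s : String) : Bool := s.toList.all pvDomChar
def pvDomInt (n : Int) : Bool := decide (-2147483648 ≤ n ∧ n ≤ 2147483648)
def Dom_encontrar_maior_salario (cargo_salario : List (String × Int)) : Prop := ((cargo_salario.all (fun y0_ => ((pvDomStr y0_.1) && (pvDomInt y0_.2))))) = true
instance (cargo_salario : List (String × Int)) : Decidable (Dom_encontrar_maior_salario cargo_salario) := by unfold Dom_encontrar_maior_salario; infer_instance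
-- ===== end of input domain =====

-- B replaces A's fused running-maximum loop by filter-positives then first-maximum-by-key; alternative decomposition, same cost.


-- ===== PORT A =====
-- for cargo, salario in d.items(): if salario > maior: update both; return (cargo_maior, maior)
def encontrar_maior_salario (cargo_salario : List (String × Int)) : String × Int :=
  let st := cargo_salario.foldl
    (fun (acc : Int × String) p => if p.2 > acc.1 then (p.2, p.1) else acc)
    ((0 : Int), "")
  (st.2, st.1)

-- ===== PORT B =====
-- positivos = [(c,s) for c,s in d.items() if s > 0]; return ("",0) if empty else max(positivos, key=salary)
def encontrar_maior_salario_alt (cargo_salario : List (String × Int)) : String × Int :=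
  let positivos := cargo_salario.filter (fun p => decide (p.2 > 0))
  match PySem.List.max? positivos (fun par => par.2) with
  | none => ("", 0)
  | some par => par

-- ===== PRECONDITION & SPEC =====
def Spec_encontrar_maior_salario (cargo_salario : List (String × Int)) (out : String × Int) : Prop := out = encontrar_maior_salario_alt cargo_salario
instance (cargo_salario : List (String × Int)) (out : String × Int) : Decidable (Spec_encontrar_maior_salario cargo_salario out) := by unfold Spec_encontrar_maior_salario; infer_instance

-- ===== CLAIM (what is proved, stated in full; the proofs are below) =====
def Claim_equal_encontrar_maior_salario : Prop := ∀ (cargo_salario : List (String × Int)), Dom_encontrar_maior_salario cargo_salario → Spec_encontrar_maior_salario cargo_salario (encontrar_maior_salario cargo_salario)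

-- ===== LEMMAS AND PROOFS =====

-- A's accumulator (maior, cargo) seen as an optional best-so-far pair (cargo, salario)
def pvOAcc : Option (String × Int) → Int × String
  | none => (0, "")
  | some (c, m) => (m, c)

-- A's loop over the whole list, from state pvOAcc acc, equals max?'s fold over the filtered list from acc
theorem pvFold_eq : ∀ (l : List (String × Int)) (acc : Option (String × Int)),
    (∀ p, acc = some p → 0 < p.2) →
    l.foldl (fun (a : Int × String) p => if p.2 > a.1 then (p.2, p.1) else a) (pvOAcc acc)
      = pvOAcc ((l.filter (fun p => decide (p.2 > 0))).foldl
          (fun a x => match a with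
            | none => some x
            | some m => if m.2 < x.2 then some x else some m) acc) := by
  intro l
  induction l with
  | nil => intro acc _; simp
  | cons x t ih =>
    intro acc h
    cases acc with
    | none =>
      by_cases hx : x.2 > 0
      · simpa [List.foldl, pvOAcc, hx] using
          ih (some x) (by intro p hp; cases hp; exact hx)
      · simpa [List.foldl, pvOAcc, hx] using ih none (by intro p hp; cases hp)
    | some q =>
      have hq : 0 < q.2 := h q rfl
      by_cases hx : x.2 > 0
      · by_cases hlt : q.2 < x.2
        · simpa [List.foldl, pvOAcc, hx, hlt, show x.2 > q.2 from hlt] using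
            ih (some x) (by intro p hp; cases hp; exact hx)
        · have : ¬ x.2 > q.2 := hlt
          simpa [List.foldl, pvOAcc, hx, hlt, this] using
            ih (some q) (by intro p hp; cases hp; exact hq)
      · have : ¬ x.2 > q.2 := fun hgt => hx (lt_trans hq hgt)
        simpa [List.foldl, pvOAcc, hx, this] using
          ih (some q) (by intro p hp; cases hp; exact hq)

-- ===== VERDICT (by name: the statement is the Claim_ definition above) =====
theorem encontrar_maior_salario_spec : Claim_equal_encontrar_maior_salario := by
  intro l _
  unfold Spec_encontrar_maior_salario encontrar_maior_salario encontrar_maior_salario_alt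
  have h := pvFold_eq l none (by intro p hp; cases hp)
  simp only [pvOAcc] at h
  simp only [gt_iff_lt] at h ⊢
  have hmax : PySem.List.max? (l.filter (fun p => decide (0 < p.2))) (fun par => par.2)
      = (l.filter (fun p => decide (0 < p.2))).foldl
          (fun a x => match a with
            | none => some x
            | some m => if m.2 < x.2 then some x else some m) none := by
    unfold PySem.List.max?
    congr 1
    funext a x
    cases a <;> simp
  rw [h, hmax]
  cases hm : (l.filter (fun p => decide (0 < p.2))).foldl
      (fun a x => match a with
        | none => some x
        | some m => if m.2 < x.2 then some x else some m) none with
  | none => simp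
  | some q => simp
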